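-- pv_equiv track=rewrite | github.com/TensorScholar/Sorting-Visualizer | tests/python/algorithms/network-sort-test.py | verify_sorted
-- ===== SOURCE A (Python) =====
-- from typing import List, Callable, Dict, Any, Tuple, Type
--
-- def verify_sorted(original: List[int], sorted_array: List[int]) -> bool:
--     """
--     Verify that an array is correctly sorted and contains all original elements.
--
--     Args:
--         original: The original unsorted array
--         sorted_array: The supposedly sorted array
--
--     Returns:
--         bool: True if array is correctly sorted and contains all original elements
--     """
--     # Check length
--     if len(original) != len(sorted_array):
--         return False
--
--     # Check if sorted
--     for i in range(1, len(sorted_array)):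
--         if sorted_array[i] < sorted_array[i-1]:
--             return False
--
--     # Check if same elements (use frequency count for efficiency)
--     from collections import Counter
--     return Counter(original) == Counter(sorted_array)
-- ===== SOURCE B (Python) =====
-- def verify_sorted(original, sorted_array):
--     return sorted(original) == sorted_array
-- ===== Notes on version B (the rewrite author's own statement) =====
-- stated objective: simpler
-- what changed: Replaced the length check + adjacent-pair loop + Counter comparison with a single sort-and-compare: sorted(original) == sorted_array (C-level sort and list equality replace the Python-level loop and Counter construction).
import Mathlib
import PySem

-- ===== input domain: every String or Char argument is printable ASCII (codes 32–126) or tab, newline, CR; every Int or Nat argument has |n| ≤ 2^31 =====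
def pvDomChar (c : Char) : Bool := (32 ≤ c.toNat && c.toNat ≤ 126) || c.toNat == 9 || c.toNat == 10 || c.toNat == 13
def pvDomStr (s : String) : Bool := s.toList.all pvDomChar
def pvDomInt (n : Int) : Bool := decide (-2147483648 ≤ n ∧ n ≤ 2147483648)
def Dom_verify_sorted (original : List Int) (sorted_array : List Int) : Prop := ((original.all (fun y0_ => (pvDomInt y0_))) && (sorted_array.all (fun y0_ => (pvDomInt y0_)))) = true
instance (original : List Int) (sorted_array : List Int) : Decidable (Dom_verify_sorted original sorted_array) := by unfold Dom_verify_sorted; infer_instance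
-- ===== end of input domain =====

-- B replaces A's length check + adjacent-pair loop + Counter comparison by a single sort-and-compare (simpler).


-- ===== PORT A =====
-- the 'for i in range(1, len(sorted_array))' loop with its early 'return False'
def vsLoop (sa : List Int) : List Int → Bool
  | [] => true
  | i :: rest =>
      if PySem.List.pyGetD sa i 0 < PySem.List.pyGetD sa (i - 1) 0 then false
      else vsLoop sa rest

-- Python's dict '==' (order-insensitive): same keys with the same values, both ways
def vsDictEq (d₁ d₂ : PySem.Dict Int Int) : Bool :=
  d₁.keys.all (fun k => d₁.get? k == d₂.get? k) && d₂.keys.all (fun k => d₂.get? k == d₁.get? k)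

def verify_sorted (original : List Int) (sorted_array : List Int) : Bool :=
  if (original.length : Int) ≠ (sorted_array.length : Int) then false
  else if vsLoop sorted_array (PySem.List.pyRange 1 (sorted_array.length : Int)) = false then false
  else vsDictEq (PySem.Dict.counter original) (PySem.Dict.counter sorted_array)

-- ===== PORT B =====
def verify_sorted_alt (original : List Int) (sorted_array : List Int) : Bool :=
  PySem.List.sorted original (fun x => x) == sorted_array

-- ===== PRECONDITION & SPEC =====
def Spec_verify_sorted (original : List Int) (sorted_array : List Int) (out : Bool) : Prop := out = verify_sorted_alt original sorted_array
instance (original : List Int) (sorted_array : List Int) (out : Bool) : Decidable (Spec_verify_sorted original sorted_array out) := by unfold Spec_verify_sorted; infer_instance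

-- ===== CLAIM (what is proved, stated in full; the proofs are below) =====
def Claim_equal_verify_sorted : Prop := ∀ (original : List Int) (sorted_array : List Int), Dom_verify_sorted original sorted_array → Spec_verify_sorted original sorted_array (verify_sorted original sorted_array)

-- ===== LEMMAS AND PROOFS =====

-- the early-exit loop is List.all of its body's negation
lemma vsLoop_eq_all (sa : List Int) (l : List Int) :
    vsLoop sa l = l.all (fun i => !decide (PySem.List.pyGetD sa i 0 < PySem.List.pyGetD sa (i - 1) 0)) := by
  induction l with
  | nil => rfl
  | cons i rest ih =>
      by_cases h : PySem.List.pyGetD sa i 0 < PySem.List.pyGetD sa (i - 1) 0 <;>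
        simp [vsLoop, h, ih]

-- A's adjacency loop succeeds iff the list is pairwise non-decreasing
lemma vsLoop_iff (sa : List Int) :
    vsLoop sa (PySem.List.pyRange 1 (sa.length : Int)) = true ↔ sa.Pairwise (· ≤ ·) := by
  rw [vsLoop_eq_all, List.all_eq_true, ← List.isChain_iff_pairwise, List.isChain_iff_getElem]
  constructor
  · intro h k hk
    have hm : ((k : Int) + 1) ∈ PySem.List.pyRange 1 (sa.length : Int) := by
      rw [PySem.List.mem_pyRange_one]; omega
    have := h _ hm
    rw [PySem.List.pyGetD_of_nonneg _ _ (by omega), PySem.List.pyGetD_of_nonneg _ _ (by omega)] at this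
    have h1 : ((k : Int) + 1).toNat = k + 1 := by omega
    have h2 : ((k : Int) + 1 - 1).toNat = k := by omega
    rw [h1, h2, List.getD_eq_getElem _ _ (by omega), List.getD_eq_getElem _ _ (by omega)] at this
    simpa using this
  · intro h i hi
    rw [PySem.List.mem_pyRange_one] at hi
    have hnn : (0 : Int) ≤ i := by omega
    rw [PySem.List.pyGetD_of_nonneg _ _ hnn, PySem.List.pyGetD_of_nonneg _ _ (by omega)]
    have hk : i.toNat - 1 + 1 = i.toNat := by omega
    have hlt : i.toNat - 1 + 1 < sa.length := by omega
    have := h (i.toNat - 1) hlt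
    have h2 : (i - 1).toNat = i.toNat - 1 := by omega
    rw [h2, List.getD_eq_getElem _ _ (by omega), List.getD_eq_getElem _ _ (by omega)]
    simp only [hk] at this ⊢
    simpa using this

lemma get?_counter (xs : List Int) (v : Int) :
    (PySem.Dict.counter xs).get? v = if v ∈ xs then some ((xs.count v : Int)) else none := by
  by_cases h : v ∈ xs
  · cases hg : (PySem.Dict.counter xs).get? v with
    | none =>
        exfalso
        have := (PySem.Dict.get?_eq_none_iff_contains (PySem.Dict.counter xs) v).mp hg
        rw [PySem.Dict.contains_counter] at this
        simp [h] at this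
    | some c =>
        have := PySem.Dict.getD_counter xs v
        rw [PySem.Dict.getD_eq_get?_getD, hg] at this
        simp only [Option.getD_some] at this
        simp [h, this]
  · rw [if_neg h]
    apply (PySem.Dict.get?_eq_none_iff_contains _ _).mpr
    rw [PySem.Dict.contains_counter]
    simpa using h

-- Python's 'Counter(xs) == Counter(ys)' is multiset equality
lemma vsDictEq_iff (xs ys : List Int) :
    vsDictEq (PySem.Dict.counter xs) (PySem.Dict.counter ys) = true ↔ xs.Perm ys := by
  unfold vsDictEq
  rw [Bool.and_eq_true, List.all_eq_true, List.all_eq_true]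
  simp only [PySem.Dict.keys_counter, get?_counter, beq_iff_eq]
  constructor
  · rintro ⟨h1, h2⟩
    rw [List.perm_iff_count]
    intro v
    by_cases hx : v ∈ xs
    · have := h1 v (by rw [PySem.Set.mem_ofList]; exact hx)
      rw [if_pos hx] at this
      by_cases hy : v ∈ ys
      · rw [if_pos hy] at this
        have : (xs.count v : Int) = (ys.count v : Int) := by simpa using this
        exact_mod_cast this
      · rw [if_neg hy] at this; simp at this
    · by_cases hy : v ∈ ys
      · have := h2 v (by rw [PySem.Set.mem_ofList]; exact hy)
        rw [if_pos hy, if_neg hx] at this; simp at this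
      · simp [List.count_eq_zero_of_not_mem hx, List.count_eq_zero_of_not_mem hy]
  · intro hp
    have hcount := List.perm_iff_count.mp hp
    constructor <;> intro v hv <;> rw [PySem.Set.mem_ofList] at hv
    · simp [hv, hp.mem_iff.mp hv, hcount v]
    · simp [hv, hp.mem_iff.mpr hv, hcount v]

lemma verify_sorted_eq (o s : List Int) : verify_sorted o s = verify_sorted_alt o s := by
  unfold verify_sorted verify_sorted_alt
  by_cases hs : PySem.List.sorted o (fun x => x) = s
  · have hperm : s.Perm o := hs ▸ PySem.List.sorted_perm o (fun x => x) false
    have hpw : s.Pairwise (· ≤ ·) := hs ▸ PySem.List.sorted_pairwise o (fun x => x)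
    have hlen : o.length = s.length := hperm.symm.length_eq
    rw [if_neg (by exact_mod_cast (by omega : ¬ (o.length : Int) ≠ (s.length : Int)))]
    rw [if_neg (by simp [(vsLoop_iff s).mpr hpw])]
    rw [(vsDictEq_iff o s).mpr hperm.symm]
    simp [hs]
  · have hB : (PySem.List.sorted o (fun x => x) == s) = false := by
      simpa using hs
    rw [hB]
    split_ifs with h1 h2
    · rfl
    · rfl
    · by_cases hd : vsDictEq (PySem.Dict.counter o) (PySem.Dict.counter s) = true
      · exfalso
        have hperm : o.Perm s := (vsDictEq_iff o s).mp hd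
        have hloop : vsLoop s (PySem.List.pyRange 1 (s.length : Int)) = true := by
          cases hv : vsLoop s (PySem.List.pyRange 1 (s.length : Int))
          · exact absurd hv h2
          · rfl
        exact hs (PySem.List.sorted_id_eq_of_perm_of_pairwise o s hperm.symm
          ((vsLoop_iff s).mp hloop))
      · exact Bool.eq_false_iff.mpr (fun h => hd h)

-- ===== VERDICT (by name: the statement is the Claim_ definition above) =====
theorem verify_sorted_spec : Claim_equal_verify_sorted := by
  intro o s _
  unfold Spec_verify_sorted
  exact verify_sorted_eq o s
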